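-- pv_equiv track=rewrite | github.com/kongusen/AutoReportAI | backend/app/services/application/agent_input/prompt_templates.py | _collect_schema_hints
-- ===== SOURCE A (Python) =====
-- from typing import Any, Dict, List
--
-- def _collect_schema_hints(tables: List[Dict[str, Any]]):
--     measures: List[str] = []
--     dimensions: List[str] = []
--     time_cols: List[str] = []
--     for t in tables:
--         measures.extend(t.get("measure_columns") or [])
--         dimensions.extend(t.get("dimension_columns") or [])
--         time_cols.extend(t.get("time_columns") or [])
--     # 去重保持顺序
--     measures = list(dict.fromkeys(measures))
--     dimensions = list(dict.fromkeys(dimensions))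
--     time_cols = list(dict.fromkeys(time_cols))
--     return measures, dimensions, time_cols
-- ===== SOURCE B (Python) =====
-- from typing import Any, Dict, List
--
-- def _collect_schema_hints(tables: List[Dict[str, Any]]):
--     def gather(key):
--         cols: List[str] = []
--         for t in tables:
--             cols += t.get(key) or []
--         return cols
--
--     def dedup(xs):
--         # removal-based dedup: repeatedly take the head and delete all its
--         # later duplicates; keeps first occurrences in order, no hash set.
--         out: List[str] = []
--         while xs:
--             h = xs[0]
--             out.append(h)
--             xs = [y for y in xs[1:] if y != h]
--         return out
--
--     return (dedup(gather("measure_columns")),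
--             dedup(gather("dimension_columns")),
--             dedup(gather("time_columns")))
-- ===== Notes on version B (the rewrite author's own statement) =====
-- stated objective: alternative
-- what changed: Replaces A's hash-based dict.fromkeys dedup with a removal-based algorithm: repeatedly take the head of the remaining list and filter out all of its later duplicates, so no hash structure (dict/set) is used at all; collection is decomposed per key instead of per table.
import Mathlib
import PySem

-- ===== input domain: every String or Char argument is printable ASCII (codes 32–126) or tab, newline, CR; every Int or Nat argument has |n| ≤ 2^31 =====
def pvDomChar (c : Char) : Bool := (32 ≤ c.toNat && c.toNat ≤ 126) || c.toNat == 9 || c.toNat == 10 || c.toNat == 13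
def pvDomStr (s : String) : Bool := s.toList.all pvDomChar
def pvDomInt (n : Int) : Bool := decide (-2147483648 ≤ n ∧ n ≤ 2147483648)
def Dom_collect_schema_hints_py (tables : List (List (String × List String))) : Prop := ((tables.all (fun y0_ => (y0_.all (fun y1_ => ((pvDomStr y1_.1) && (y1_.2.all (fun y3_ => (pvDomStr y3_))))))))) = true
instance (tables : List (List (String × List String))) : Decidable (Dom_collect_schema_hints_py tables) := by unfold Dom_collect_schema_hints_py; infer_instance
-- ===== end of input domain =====

-- B replaces A's hash-based dict.fromkeys dedup with a removal-based algorithm (take the head,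
-- delete its later duplicates, repeat — no hash structure), gathering per key instead of per table;
-- return values proved identical. Objective: alternative (not claimed faster).

-- shared helper: the expression `t.get(key) or []` (present verbatim in both Pythons)
def pyGetOr (t : List (String × List String)) (k : String) : List String :=
  match PySem.Dict.get? ⟨t⟩ k with
  | some v => if v.isEmpty then [] else v   -- `or []`: an empty list is falsy
  | none => []

-- ===== PORT A =====
def collect_schema_hints_py (tables : List (List (String × List String))) : List String × List String × List String :=
  let r := tables.foldl (fun (acc : List String × List String × List String) t =>
      (acc.1 ++ pyGetOr t "measure_columns",
       acc.2.1 ++ pyGetOr t "dimension_columns",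
       acc.2.2 ++ pyGetOr t "time_columns")) ([], [], [])
  (PySem.List.dedup r.1, PySem.List.dedup r.2.1, PySem.List.dedup r.2.2)

-- ===== PORT B =====
-- `gather(key)`: one loop over the tables concatenating `t.get(key) or []`
def gatherB (tables : List (List (String × List String))) (k : String) : List String :=
  tables.foldl (fun cols t => cols ++ pyGetOr t k) []

-- `dedup(xs)`: while xs: take the head, drop all its later duplicates.
-- The while loop shrinks xs each step; the Nat argument is only a totality bound (fuel = initial length).
def dedupGo : Nat → List String → List String
  | _, [] => []
  | 0, _ :: _ => []   -- never reached: fuel starts at the list's length and dominates it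
  | n + 1, h :: tl => h :: dedupGo n (tl.filter (fun y => y != h))

def dedupB (xs : List String) : List String := dedupGo xs.length xs

def collect_schema_hints_py_alt (tables : List (List (String × List String))) : List String × List String × List String :=
  (dedupB (gatherB tables "measure_columns"),
   dedupB (gatherB tables "dimension_columns"),
   dedupB (gatherB tables "time_columns"))

-- ===== PRECONDITION & SPEC =====
def Spec_collect_schema_hints_py (tables : List (List (String × List String))) (out : List String × List String × List String) : Prop := out = collect_schema_hints_py_alt tables
instance (tables : List (List (String × List String))) (out : List String × List String × List String) : Decidable (Spec_collect_schema_hints_py tables out) := by unfold Spec_collect_schema_hints_py; infer_instance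

-- ===== CLAIM =====
def Claim_equal_collect_schema_hints_py : Prop := ∀ (tables : List (List (String × List String))), Dom_collect_schema_hints_py tables → Spec_collect_schema_hints_py tables (collect_schema_hints_py tables)

-- ===== LEMMAS AND PROOFS =====

-- a fold over a triple with independent components splits into three folds
lemma foldl_triple {τ α β γ : Type} (l : List τ) (f : α → τ → α) (g : β → τ → β) (h : γ → τ → γ)
    (a : α) (b : β) (c : γ) :
    l.foldl (fun (p : α × β × γ) t => (f p.1 t, g p.2.1 t, h p.2.2 t)) (a, b, c)
      = (l.foldl f a, l.foldl g b, l.foldl h c) := by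
  induction l generalizing a b c with
  | nil => rfl
  | cons t l ih => simpa using ih (f a t) (g b t) (h c t)

-- filtering out an element already in the accumulating set does not change Set.ofList-style folds
lemma foldl_add_filter_mem (x : String) :
    ∀ (l : List String) (s : PySem.Set String), x ∈ s →
      List.foldl PySem.Set.add s (l.filter (fun y => y != x)) = List.foldl PySem.Set.add s l := by
  intro l
  induction l with
  | nil => intro s _; rfl
  | cons y l ih =>
      intro s hx
      by_cases hyx : y = x
      · subst hyx
        have hadd : PySem.Set.add s y = s := by
          simp [PySem.Set.add, PySem.Set.contains, hx]
        simp [hadd, ih s hx]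
      · simp only [List.filter_cons, show (y != x) = true by simp [hyx], List.foldl_cons]
        exact ih (PySem.Set.add s y) (by simp [PySem.Set.add]; split <;> simp [hx])

-- prepending a fresh head to the accumulator commutes with the fold when no later element equals it
lemma foldl_add_cons_head (x : String) :
    ∀ (l : List String) (s : PySem.Set String), (∀ y ∈ l, y ≠ x) →
      List.foldl PySem.Set.add (x :: s) l = x :: List.foldl PySem.Set.add s l := by
  intro l
  induction l with
  | nil => intro s _; rfl
  | cons y l ih =>
      intro s hne
      have hyx : y ≠ x := hne y (List.mem_cons_self ..)
      have hc : PySem.Set.contains (x :: s) y = PySem.Set.contains s y := by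
        simp [PySem.Set.contains, hyx]
      have hadd : PySem.Set.add (x :: s) y = x :: PySem.Set.add s y := by
        simp only [PySem.Set.add, hc]
        split <;> simp
      simp only [List.foldl_cons, hadd]
      exact ih (PySem.Set.add s y) (fun z hz => hne z (List.mem_cons_of_mem _ hz))

-- the removal-based dedup computes exactly list(dict.fromkeys(xs)) (first occurrences, in order)
lemma dedupGo_eq_ofList : ∀ (n : Nat) (xs : List String), xs.length ≤ n →
    dedupGo n xs = PySem.Set.ofList xs := by
  intro n
  induction n with
  | zero =>
      intro xs hlen
      rw [List.length_eq_zero_iff.mp (Nat.le_zero.mp hlen)]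
      rfl
  | succ n ih =>
      intro xs hlen
      match xs with
      | [] => rfl
      | h :: tl =>
          have hfilt : ∀ y ∈ tl.filter (fun y => y != h), y ≠ h := by
            intro y hy
            simpa using (List.of_mem_filter hy)
          have hrec : (tl.filter (fun y => y != h)).length ≤ n :=
            le_trans (List.length_filter_le _ tl) (Nat.le_of_succ_le_succ hlen)
          have hofl : PySem.Set.ofList (h :: tl) = List.foldl PySem.Set.add (h :: []) tl := by
            rw [PySem.Set.ofList_eq_foldl]; rfl
          rw [dedupGo, ih _ hrec, hofl,
              ← foldl_add_filter_mem h tl (h :: []) (List.mem_cons_self ..),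
              foldl_add_cons_head h _ [] hfilt, PySem.Set.ofList_eq_foldl]

lemma dedupB_eq_dedup (xs : List String) : dedupB xs = PySem.List.dedup xs := by
  rw [PySem.List.dedup_eq_ofList]
  exact dedupGo_eq_ofList xs.length xs le_rfl

theorem collect_schema_hints_py_spec : Claim_equal_collect_schema_hints_py := by
  intro tables _
  unfold Spec_collect_schema_hints_py collect_schema_hints_py collect_schema_hints_py_alt
  rw [foldl_triple tables
        (fun (a : List String) t => a ++ pyGetOr t "measure_columns")
        (fun (a : List String) t => a ++ pyGetOr t "dimension_columns")
        (fun (a : List String) t => a ++ pyGetOr t "time_columns") [] [] []]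
  simp only [dedupB_eq_dedup, gatherB]
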